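-- pv_equiv track=rewrite | github.com/ksomemo/Competitive-programming | atcoder/agc/005/A.py | editorial
-- ===== SOURCE A (Python) =====
-- def editorial(X):
--     stack = [X[0]]
--     ans = len(X)
--     for c in X[1:]:
--         if stack and stack[-1] == "S" and c == "T":
--             ans -= 2
--             stack.pop()
--         else:
--             stack.append(c)
--
--     return ans
-- ===== SOURCE B (Python) =====
-- def editorial(X):
--     # Repeatedly delete the first "ST" occurrence until none remains; deleting an
--     # "ST" pair never changes the fully-reduced form (the rewriting is confluent),
--     # so the final length equals A's stack-based answer.
--     while True:
--         i = X.find("ST")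
--         if i == -1:
--             return len(X)
--         X = X[:i] + X[i+2:]
-- ===== Notes on version B (the rewrite author's own statement) =====
-- stated objective: alternative
-- what changed: B abandons the single-pass stack simulation entirely: it treats the task as string rewriting and repeatedly deletes the first 'ST' occurrence (str.find + slicing) until none remains, returning the length of the irreducible string; correct because the ST-deletion rewriting is confluent, so the normal-form length is independent of deletion order.
import Mathlib
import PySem

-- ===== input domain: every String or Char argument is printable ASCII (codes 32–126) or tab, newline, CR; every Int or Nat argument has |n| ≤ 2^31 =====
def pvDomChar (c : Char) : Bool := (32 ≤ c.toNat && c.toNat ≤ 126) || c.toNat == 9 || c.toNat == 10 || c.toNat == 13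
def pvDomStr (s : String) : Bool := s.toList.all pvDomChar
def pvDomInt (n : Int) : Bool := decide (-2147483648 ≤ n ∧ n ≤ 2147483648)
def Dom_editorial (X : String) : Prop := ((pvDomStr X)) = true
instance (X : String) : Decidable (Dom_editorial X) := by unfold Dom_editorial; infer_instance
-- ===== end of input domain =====

-- B replaces A's one-pass stack simulation by a fixpoint loop that repeatedly deletes the
-- first "ST" occurrence (find + slicing) until none remains (objective: alternative algorithm;
-- not faster — O(n^2) worst case vs A's O(n)).

-- ===== PORT A =====
-- step of A's loop: state = (stack, ans); stack kept in Python order (top = last element)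
def editorialStep (st : List Char × Int) (c : Char) : List Char × Int :=
  if st.1.getLast? = some 'S' ∧ c = 'T' then
    (st.1.dropLast, st.2 - 2)
  else
    (st.1 ++ [c], st.2)

def editorial (X : String) : Int :=
  match X.toList with
  | [] => 0          -- unreachable under Pre_ (Python raises IndexError at X[0])
  | c0 :: rest => (rest.foldl editorialStep ([c0], (X.toList.length : Int))).2

-- ===== PORT B =====
-- Source B's while-True loop, on X.toList (PySem.Str.* are the same Chars.* on toList);
-- fuel = length: each iteration removes two characters, proved sufficient below.
def editorialAltGo : Nat → List Char → Int
  | 0, s => (s.length : Int)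
  | fuel + 1, s =>
    let i := PySem.Chars.find s ['S', 'T']
    if i = -1 then (s.length : Int)
    else editorialAltGo fuel
      (PySem.Chars.slice s none (some i) ++ PySem.Chars.slice s (some (i + 2)) none)

def editorial_alt (X : String) : Int := editorialAltGo X.toList.length X.toList

-- ===== PRECONDITION & SPEC =====
-- Pre_ excludes only the empty string, on which A raises IndexError at X[0].
def Pre_editorial (X : String) : Prop := X ≠ ""
instance (X : String) : Decidable (Pre_editorial X) := by unfold Pre_editorial; infer_instance
def pvWitness_editorial : String := "TSSTST"

def Spec_editorial (X : String) (out : Int) : Prop := out = editorial_alt X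
instance (X : String) (out : Int) : Decidable (Spec_editorial X out) := by unfold Spec_editorial; infer_instance

-- ===== CLAIM (what is proved, stated in full; the proofs are below) =====
def Claim_equal_editorial : Prop := ∀ (X : String), Dom_editorial X → Pre_editorial X → Spec_editorial X (editorial X)

-- ===== LEMMAS AND PROOFS =====

-- the stack component of A's step, and the stack left by a run of A's loop
def sstep (st : List Char) (c : Char) : List Char :=
  if st.getLast? = some 'S' ∧ c = 'T' then st.dropLast else st ++ [c]

def sfold (st s : List Char) : List Char := s.foldl sstep st

theorem sfold_append (st u v : List Char) : sfold st (u ++ v) = sfold (sfold st u) v :=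
  List.foldl_append

-- A's full loop state in terms of sfold: ans tracks the stack length
theorem foldA (s : List Char) : ∀ (st : List Char) (a : Int),
    s.foldl editorialStep (st, a)
      = (sfold st s, a + ((sfold st s).length : Int) - st.length - s.length) := by
  induction s with
  | nil => intro st a; simp [sfold]
  | cons c r ih =>
    intro st a
    by_cases h : st.getLast? = some 'S' ∧ c = 'T'
    · have hne : st ≠ [] := by
        intro h0; rw [h0] at h; simp at h
      have hlen : 1 ≤ st.length := by
        cases st with
        | nil => exact absurd rfl hne
        | cons x xs => simp
      have hstep : editorialStep (st, a) c = (st.dropLast, a - 2) := by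
        simp [editorialStep, h]
      have hsf : sfold st (c :: r) = sfold st.dropLast r := by
        simp [sfold, sstep, h]
      rw [List.foldl_cons, hstep, ih, hsf]
      have hdl : (st.dropLast.length : Int) = (st.length : Int) - 1 := by
        rw [List.length_dropLast]; omega
      refine Prod.ext rfl ?_
      simp only [hdl, List.length_cons]
      push_cast
      omega
    · have hstep : editorialStep (st, a) c = (st ++ [c], a) := by
        simp only [editorialStep]; rw [if_neg h]
      have hsf : sfold st (c :: r) = sfold (st ++ [c]) r := by
        simp only [sfold, List.foldl_cons, sstep]; rw [if_neg h]
      rw [List.foldl_cons, hstep, ih, hsf]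
      refine Prod.ext rfl ?_
      simp only [List.length_append, List.length_cons, List.length_nil]
      push_cast
      omega

-- deleting one "ST" pair anywhere does not change the final stack
theorem sfold_removal (u v st : List Char) :
    sfold st (u ++ 'S' :: 'T' :: v) = sfold st (u ++ v) := by
  rw [show u ++ 'S' :: 'T' :: v = u ++ (['S', 'T'] ++ v) by simp,
      sfold_append, sfold_append, sfold_append st u v]
  congr 1
  show sfold (sfold st u) ['S', 'T'] = sfold st u
  set w := sfold st u with hw
  have h1 : sstep w 'S' = w ++ ['S'] := by
    simp [sstep]
  have h2 : sstep (w ++ ['S']) 'T' = w := by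
    simp [sstep]
  simp [sfold, h1, h2]

-- a string with no "ST" infix is already fully reduced
theorem sfold_no_infix (s : List Char) : ∀ (st : List Char),
    ¬ (['S', 'T'] <:+: s) → ¬ (st.getLast? = some 'S' ∧ s.head? = some 'T') →
    sfold st s = st ++ s := by
  induction s with
  | nil => intro st _ _; simp [sfold]
  | cons c r ih =>
    intro st hinf hguard
    have hpush : sstep st c = st ++ [c] := by
      simp only [sstep]
      rw [if_neg]
      intro h
      exact hguard ⟨h.1, by simp [h.2]⟩
    have hr : ¬ (['S', 'T'] <:+: r) := fun h => hinf (h.trans (List.suffix_cons c r).isInfix)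
    have hg : ¬ ((st ++ [c]).getLast? = some 'S' ∧ r.head? = some 'T') := by
      rintro ⟨h1, h2⟩
      have hc : c = 'S' := by simpa using h1
      apply hinf
      cases r with
      | nil => simp at h2
      | cons d r' =>
        have hd : d = 'T' := by simpa using h2
        exact ⟨[], r', by simp [hc, hd]⟩
    show sfold (sstep st c) r = st ++ c :: r
    rw [hpush, ih (st ++ [c]) hr hg]
    simp

-- B's loop computes the length of the fully reduced string, given enough fuel
theorem go_eq (fuel : Nat) : ∀ (s : List Char), s.length ≤ fuel →
    editorialAltGo fuel s = ((sfold [] s).length : Int) := by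
  induction fuel with
  | zero =>
    intro s hs
    have : s = [] := List.length_eq_zero_iff.mp (Nat.le_zero.mp hs)
    subst this
    simp [editorialAltGo, sfold]
  | succ fuel ih =>
    intro s hs
    by_cases h : PySem.Chars.find s ['S', 'T'] = -1
    · have hninf : ¬ (['S', 'T'] <:+: s) := (PySem.Chars.find_eq_neg_one_iff s _).mp h
      rw [sfold_no_infix s [] hninf (by simp)]
      simp [editorialAltGo, h]
    · have hpos : 0 ≤ PySem.Chars.find s ['S', 'T'] :=
        (PySem.Chars.find_nonneg_iff s _).mpr ((PySem.Chars.find_ne_neg_one_iff s _).mp h)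
      set i := PySem.Chars.find s ['S', 'T'] with hi
      set j := i.toNat with hj
      have hij : i = (j : Int) := by omega
      have hpref : ['S', 'T'] <+: s.drop j := (PySem.Chars.find_spec hpos).1
      obtain ⟨t, ht⟩ := hpref
      have hdrop2 : s.drop (j + 2) = t := by
        rw [← List.drop_drop (i := 2) (j := j), ← ht]
        simp
      have hsplit : s = s.take j ++ 'S' :: 'T' :: t := by
        conv_lhs => rw [← List.take_append_drop j s]
        rw [← ht]; simp
      have hslice1 : PySem.Chars.slice s none (some i) = s.take j := by
        rw [hij, PySem.Chars.slice_eq_listSlice, PySem.List.slice_to_natCast]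
      have hslice2 : PySem.Chars.slice s (some (i + 2)) none = s.drop (j + 2) := by
        rw [hij, show (j : Int) + 2 = ((j + 2 : Nat) : Int) by push_cast; ring,
            PySem.Chars.slice_eq_listSlice, PySem.List.slice_from_natCast]
      have hlen : s.length = (s.take j).length + 2 + t.length := by
        conv_lhs => rw [hsplit]
        simp; omega
      have hfuel : ((s.take j) ++ t).length ≤ fuel := by
        rw [List.length_append]; omega
      rw [show editorialAltGo (fuel + 1) s
            = editorialAltGo fuel
                (PySem.Chars.slice s none (some i) ++ PySem.Chars.slice s (some (i + 2)) none) by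
            simp only [editorialAltGo]; rw [if_neg h],
          hslice1, hslice2, hdrop2, ih _ hfuel]
      congr 2
      conv_rhs => rw [hsplit]
      exact (sfold_removal (s.take j) t []).symm

-- ===== VERDICT (by name: the statement is the Claim_ definition above) =====
theorem editorial_spec : Claim_equal_editorial := by
  intro X _ hpre
  unfold Spec_editorial editorial editorial_alt
  cases hX : X.toList with
  | nil => exact absurd (String.toList_inj.mp (by simp [hX])) hpre
  | cons c0 rest =>
    rw [go_eq _ _ (le_refl _)]
    show (rest.foldl editorialStep ([c0], ((c0 :: rest).length : Int))).2
        = ((sfold [] (c0 :: rest)).length : Int)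
    have h0 : sfold [] (c0 :: rest) = sfold [c0] rest := by
      simp [sfold, sstep]
    rw [foldA, h0]
    simp only [List.length_cons, List.length_nil]
    push_cast
    omega
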